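-- pv_equiv track=rewrite | github.com/afermg/aliby | src/agora/io/writer.py | format_values_tpback
-- ===== SOURCE A (Python) =====
-- def format_values_tpback(states: list, val_name: str):
--     tp_back, trap, value = [
--         [[] for _ in states[0][val_name]] for _ in range(3)
--     ]
--
--     lbl_tuples = [
--         (tp_back, trap, cell_label)
--         for trap, state in enumerate(states)
--         for tp_back, value in enumerate(state[val_name])
--         for cell_label in value
--     ]
--     if len(lbl_tuples):
--         tp_back, trap, value = zip(*lbl_tuples)
--
--     return tp_back, trap, value
-- ===== SOURCE B (Python) =====
-- def format_values_tpback(states: list, val_name: str):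
--     grids = [state[val_name] for state in states]
--     tp_back = [tp for grid in grids for tp, cells in enumerate(grid) for _ in cells]
--     trap = [i for i, grid in enumerate(grids) for _ in range(sum(len(cells) for cells in grid))]
--     value = [lbl for grid in grids for cells in grid for lbl in cells]
--     return tuple(tp_back), tuple(trap), tuple(value)
-- ===== Notes on version B (the rewrite author's own statement) =====
-- stated objective: alternative
-- what changed: Instead of collecting (tp,trap,label) triples in one triple-nested comprehension and transposing with zip(*...), B computes each of the three output sequences in its own independent pass: tp_back by emitting each timepoint index once per cell it holds, trap by repeating each trap index sum-of-lengths times (a count-and-repeat, never visiting the labels), and value by plain flattening; Pre_ excludes empty states and missing keys (A raises) and the all-empty case with states[0][val_name] non-empty, where A returns lists of empty lists (not a value of the declared int-sequence type).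
-- outside the precondition, e.g. on format_values_tpback([{'v': [[]]}], 'v'): A returns ([[]], [[]], [[]]), B returns ([], [], [])
import Mathlib
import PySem

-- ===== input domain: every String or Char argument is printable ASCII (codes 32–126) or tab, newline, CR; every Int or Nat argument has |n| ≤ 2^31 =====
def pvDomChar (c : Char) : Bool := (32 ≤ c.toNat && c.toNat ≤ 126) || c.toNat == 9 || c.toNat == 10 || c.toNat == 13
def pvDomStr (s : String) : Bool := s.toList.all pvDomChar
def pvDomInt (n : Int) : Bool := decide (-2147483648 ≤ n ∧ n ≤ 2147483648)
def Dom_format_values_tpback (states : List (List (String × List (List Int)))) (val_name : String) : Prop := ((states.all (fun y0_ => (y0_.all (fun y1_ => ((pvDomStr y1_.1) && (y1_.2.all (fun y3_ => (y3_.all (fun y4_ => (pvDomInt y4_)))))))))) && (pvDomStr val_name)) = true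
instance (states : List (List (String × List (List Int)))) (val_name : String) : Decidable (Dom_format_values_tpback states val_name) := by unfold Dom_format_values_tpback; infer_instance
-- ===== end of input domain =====

-- B computes each of the three outputs in its own independent pass (count-and-repeat for the
-- trap indices, flattening for the labels) instead of A's triple-comprehension + zip transpose.

-- ===== PORT A =====
-- Under Pre_ the 'len(lbl_tuples) == 0' branch is only reached when states[0][val_name] = [],
-- so the initial lists-of-empty-lists (non-representable in List Int otherwise) are [].
def format_values_tpback (states : List (List (String × List (List Int)))) (val_name : String) : List Int × List Int × List Int :=
  let lbl_tuples : List (Int × Int × Int) :=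
    (PySem.List.enumerate states).flatMap (fun (ts : Int × List (String × List (List Int))) =>
      (PySem.List.enumerate ((ts.2.lookup val_name).getD [])).flatMap (fun (tv : Int × List Int) =>
        tv.2.map (fun cell_label => (tv.1, ts.1, cell_label))))
  if lbl_tuples.length ≠ 0 then
    -- zip(*lbl_tuples): the transpose of the triple list
    (lbl_tuples.map (·.1), lbl_tuples.map (·.2.1), lbl_tuples.map (·.2.2))
  else
    ([], [], [])

-- ===== PORT B =====
def format_values_tpback_alt (states : List (List (String × List (List Int)))) (val_name : String) : List Int × List Int × List Int :=
  let grids : List (List (List Int)) := states.map (fun state => (state.lookup val_name).getD [])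
  let tp_back : List Int :=
    grids.flatMap (fun grid => (PySem.List.enumerate grid).flatMap (fun tc => tc.2.map (fun _ => tc.1)))
  let trap : List Int :=
    (PySem.List.enumerate grids).flatMap (fun ig =>
      (PySem.List.pyRange 0 ((ig.2.map (fun cells => (cells.length : Int))).sum) 1).map (fun _ => ig.1))
  let value : List Int := grids.flatMap (fun grid => grid.flatMap (fun cells => cells))
  (tp_back, trap, value)

-- ===== PRECONDITION & SPEC =====
-- Pre_ excludes: empty states (A raises IndexError) and a state missing val_name (A raises
-- KeyError); and the case where every cell-label list is empty while states[0][val_name] ≠ []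
-- (A then returns lists of empty lists, not a value of the declared List Int × … type).
def Pre_format_values_tpback (states : List (List (String × List (List Int)))) (val_name : String) : Prop :=
  states ≠ [] ∧
  (∀ s ∈ states, (s.lookup val_name).isSome) ∧
  ((∀ s ∈ states, ∀ v ∈ (s.lookup val_name).getD [], v = []) →
    ((states.headD []).lookup val_name).getD [] = [])
instance (states : List (List (String × List (List Int)))) (val_name : String) : Decidable (Pre_format_values_tpback states val_name) := by unfold Pre_format_values_tpback; infer_instance

def pvWitness_format_values_tpback : (List (List (String × List (List Int)))) × String :=
  ([[("v", [[1, 2], [3]])], [("v", [[], [4]])]], "v")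

def Spec_format_values_tpback (states : List (List (String × List (List Int)))) (val_name : String) (out : List Int × List Int × List Int) : Prop := out = format_values_tpback_alt states val_name
instance (states : List (List (String × List (List Int)))) (val_name : String) (out : List Int × List Int × List Int) : Decidable (Spec_format_values_tpback states val_name out) := by unfold Spec_format_values_tpback; infer_instance

-- ===== CLAIM (what is proved, stated in full; the proofs are below) =====
def Claim_equal_format_values_tpback : Prop := ∀ (states : List (List (String × List (List Int)))) (val_name : String), Dom_format_values_tpback states val_name → Pre_format_values_tpback states val_name → Spec_format_values_tpback states val_name (format_values_tpback states val_name)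

-- ===== LEMMAS AND PROOFS =====

/-- flatMap over an enumeration that ignores the indices is a plain flatMap. -/
theorem pv_flatMap_enumerate_snd {α β : Type} (xs : List α) (s : Int) (f : α → List β) :
    (PySem.List.enumerate xs s).flatMap (fun p => f p.2) = xs.flatMap f := by
  induction xs generalizing s with
  | nil => simp [PySem.List.enumerate_nil]
  | cons h t ih => simp [PySem.List.enumerate_cons, ih]

/-- enumerate commutes with map on the payload. -/
theorem pv_enumerate_map {α β : Type} (g : α → β) (xs : List α) (s : Int) :
    PySem.List.enumerate (xs.map g) s = (PySem.List.enumerate xs s).map (fun p => (p.1, g p.2)) := by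
  induction xs generalizing s with
  | nil => simp [PySem.List.enumerate_nil]
  | cons h t ih => simp [PySem.List.enumerate_cons, ih]

/-- Emitting a constant once per element of each sublist is a replicate by the total length. -/
theorem pv_flatMap_map_const (gg : List (List Int)) (c : Int) :
    gg.flatMap (fun v => v.map (fun _ => c)) = List.replicate ((gg.map List.length).sum) c := by
  induction gg with
  | nil => rfl
  | cons h t ih =>
    rw [List.flatMap_cons, ih, List.map_cons, List.sum_cons, List.map_const', List.replicate_add]

/-- range over the Int-sum of lengths, mapped to a constant, is the same replicate. -/
theorem pv_range_sum_const (gg : List (List Int)) (c : Int) :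
    (PySem.List.pyRange 0 ((gg.map (fun v => (v.length : Int))).sum) 1).map (fun _ => c)
      = List.replicate ((gg.map List.length).sum) c := by
  have hcast : (gg.map (fun v => (v.length : Int))).sum = ((gg.map List.length).sum : Int) := by
    induction gg with
    | nil => simp
    | cons h t ih => simp [ih]
  rw [hcast, PySem.List.pyRange_one, Int.sub_zero, Int.toNat_natCast, List.map_map]
  simp only [Function.comp_def, List.map_const', List.length_range]

theorem format_values_tpback_eq (states : List (List (String × List (List Int)))) (val_name : String) :
    format_values_tpback states val_name = format_values_tpback_alt states val_name := by
  unfold format_values_tpback format_values_tpback_alt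
  set g : List (String × List (List Int)) → List (List Int) :=
    fun state => (state.lookup val_name).getD [] with hg
  set l : List (Int × Int × Int) :=
    (PySem.List.enumerate states).flatMap (fun ts =>
      (PySem.List.enumerate (g ts.2)).flatMap (fun tv =>
        tv.2.map (fun cell_label => (tv.1, ts.1, cell_label)))) with hl
  have hA : (if l.length ≠ 0 then (l.map (·.1), l.map (·.2.1), l.map (·.2.2))
      else (([], [], []) : List Int × List Int × List Int))
      = (l.map (·.1), l.map (·.2.1), l.map (·.2.2)) := by
    by_cases h : l = [] <;> simp [h]
  rw [hA]
  refine Prod.ext ?_ (Prod.ext ?_ ?_)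
  · -- tp_back
    show l.map (·.1)
        = (states.map g).flatMap (fun grid =>
            (PySem.List.enumerate grid).flatMap (fun tc => tc.2.map (fun _ => tc.1)))
    rw [hl, List.map_flatMap, List.flatMap_map,
      ← pv_flatMap_enumerate_snd states 0
        (fun s => (PySem.List.enumerate (g s)).flatMap (fun tv => tv.2.map (fun _ => tv.1)))]
    congr 1; funext ts
    rw [List.map_flatMap]; congr 1; funext tv; rw [List.map_map]; rfl
  · -- trap
    show l.map (·.2.1)
        = (PySem.List.enumerate (states.map g)).flatMap (fun ig =>
            (PySem.List.pyRange 0 ((ig.2.map (fun cells => (cells.length : Int))).sum) 1).map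
              (fun _ => ig.1))
    rw [hl, List.map_flatMap, pv_enumerate_map, List.flatMap_map]
    congr 1; funext ts
    rw [List.map_flatMap]
    have h1 : (PySem.List.enumerate (g ts.2)).flatMap
        (fun tv => (tv.2.map (fun cl => (tv.1, ts.1, cl))).map (·.2.1))
        = (g ts.2).flatMap (fun v => v.map (fun _ => ts.1)) := by
      rw [← pv_flatMap_enumerate_snd (g ts.2) 0 (fun v => v.map (fun _ => ts.1))]
      congr 1; funext tv; rw [List.map_map]; rfl
    rw [h1, pv_flatMap_map_const, pv_range_sum_const]
  · -- value
    show l.map (·.2.2)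
        = (states.map g).flatMap (fun grid => grid.flatMap (fun cells => cells))
    rw [hl, List.map_flatMap, List.flatMap_map,
      ← pv_flatMap_enumerate_snd states 0 (fun s => (g s).flatMap (fun cells => cells))]
    congr 1; funext ts
    rw [List.map_flatMap,
      ← pv_flatMap_enumerate_snd (g ts.2) 0 (fun cells => cells)]
    congr 1; funext tv; rw [List.map_map]; simp [Function.comp_def]

-- ===== VERDICT (by name: the statement is the Claim_ definition above) =====
theorem format_values_tpback_spec : Claim_equal_format_values_tpback := by
  intro states val_name _ _
  unfold Spec_format_values_tpback
  exact format_values_tpback_eq states val_name
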